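-- pv_equiv track=rewrite | github.com/BigLeno/Metadata-experiences | Components/Season.py | handle_no_season
-- ===== SOURCE A (Python) =====
-- def handle_no_season(data, season):
--     lines = data.split('\n')
--     if '<episodedetails>' in data and '<season>' not in data and '</season>' not in data:
--         for i, line in enumerate(lines):
--             if '<showtitle>' in line:
--                 lines.insert(i+1, f'  <season>{season}</season>')
--                 data = '\n'.join(lines)
--                 break
--     return data
-- ===== SOURCE B (Python) =====
-- def handle_no_season(data, season):
--     if '<episodedetails>' in data and '<season>' not in data and '</season>' not in data:
--         pos = data.find('<showtitle>')
--         if pos != -1: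
--             end = data.find('\n', pos)
--             if end == -1:
--                 end = len(data)
--             return data[:end] + f'\n  <season>{season}</season>' + data[end:]
--     return data
-- ===== Notes on version B (the rewrite author's own statement) =====
-- stated objective: alternative
-- what changed: B drops the split('\n')/enumerate/insert/join line-list machinery and works on the flat string: it finds the '<showtitle>' occurrence, finds the end of that line with str.find('\n', pos) (falling back to len(data)), and splices the season tag in with two slices.
import Mathlib
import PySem

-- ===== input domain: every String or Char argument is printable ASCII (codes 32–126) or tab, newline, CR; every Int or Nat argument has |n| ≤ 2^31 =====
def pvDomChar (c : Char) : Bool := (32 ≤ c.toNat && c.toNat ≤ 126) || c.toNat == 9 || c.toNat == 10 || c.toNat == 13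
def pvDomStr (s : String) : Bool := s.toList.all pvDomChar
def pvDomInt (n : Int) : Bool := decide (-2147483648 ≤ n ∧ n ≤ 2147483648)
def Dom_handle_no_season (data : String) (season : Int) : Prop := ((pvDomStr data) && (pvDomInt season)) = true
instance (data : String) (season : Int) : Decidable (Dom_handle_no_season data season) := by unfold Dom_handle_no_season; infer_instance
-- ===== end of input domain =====

-- B replaces A's split/insert/join over a line list by direct string offsets (find the
-- showtitle occurrence, then the end of its line) and one concatenation; objective: alternative.

-- ===== PORT A =====
-- the for-loop over enumerate(lines): on the first line containing '<showtitle>',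
-- insert the season tag after it and return the '\n'-join; otherwise return data
def hnsLoop (season : Int) (lines : List String) (data : String) :
    List (Int × String) → String
  | [] => data
  | (i, line) :: rest =>
    if PySem.Str.isIn "<showtitle>" line then
      PySem.Str.join "\n" (PySem.List.insert lines (i + 1)
        ("  <season>" ++ PySem.Int.toStr season ++ "</season>"))
    else hnsLoop season lines data rest

def handle_no_season (data : String) (season : Int) : String :=
  -- data.split('\n'): sep "\n" is nonempty, so split? is always `some`; getD [] just totalizes
  let lines := (PySem.Str.split? data "\n").getD []
  if PySem.Str.isIn "<episodedetails>" data && !PySem.Str.isIn "<season>" data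
      && !PySem.Str.isIn "</season>" data then
    hnsLoop season lines data (PySem.List.enumerate lines)
  else data

-- ===== PORT B =====
def handle_no_season_alt (data : String) (season : Int) : String :=
  if PySem.Str.isIn "<episodedetails>" data && !PySem.Str.isIn "<season>" data
      && !PySem.Str.isIn "</season>" data then
    let pos := PySem.Str.find data "<showtitle>"
    if pos ≠ -1 then
      let e0 := PySem.Str.findFrom data "\n" pos
      let e := if e0 = -1 then PySem.Str.len data else e0
      PySem.Str.slice data none (some e) ++ "\n  <season>" ++ PySem.Int.toStr season
        ++ "</season>" ++ PySem.Str.slice data (some e) none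
    else data
  else data

-- ===== PRECONDITION & SPEC =====
def Spec_handle_no_season (data : String) (season : Int) (out : String) : Prop := out = handle_no_season_alt data season
instance (data : String) (season : Int) (out : String) : Decidable (Spec_handle_no_season data season out) := by unfold Spec_handle_no_season; infer_instance

-- ===== CLAIM (what is proved, stated in full; the proofs are below) =====
def Claim_equal_handle_no_season : Prop := ∀ (data : String) (season : Int), Dom_handle_no_season data season → Spec_handle_no_season data season (handle_no_season data season)

-- ===== LEMMAS AND PROOFS =====

def mySplit : List Char → List (List Char)
  | [] => [[]]
  | c :: rest => if c = '\n' then [] :: mySplit rest else (mySplit rest).modifyHead (c :: ·)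

theorem mySplit_ne_nil (cs : List Char) : mySplit cs ≠ [] := by
  induction cs with
  | nil => simp [mySplit]
  | cons c rest ih =>
    simp only [mySplit]
    split
    · simp
    · cases h : mySplit rest with
      | nil => exact absurd h ih
      | cons a t => simp

theorem splitOn_go_eq (cs : List Char) : ∀ (fuel : Nat), cs.length ≤ fuel →
    ∀ (cur : List Char) (acc : List (List Char)),
    PySem.Chars.splitOn.go ['\n'] fuel cs cur acc
      = acc.reverse ++ (mySplit cs).modifyHead (cur.reverse ++ ·) := by
  induction cs with
  | nil =>
    intro fuel _ cur acc
    rw [PySem.Chars.splitOn.go.eq_def]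
    cases fuel <;> simp [mySplit]
  | cons c rest ih =>
    intro fuel hf cur acc
    obtain ⟨f, rfl⟩ : ∃ f, fuel = f + 1 := by
      cases fuel with
      | zero => simp at hf
      | succ f => exact ⟨f, rfl⟩
    rw [PySem.Chars.splitOn.go.eq_def]
    simp only [List.length_cons] at hf
    by_cases hc : c = '\n'
    · subst hc
      have hpfx : (['\n'] : List Char).isPrefixOf ('\n' :: rest) = true := by simp [List.isPrefixOf]
      simp only [hpfx, List.length_singleton, List.drop_succ_cons, List.drop_zero]
      rw [ih f (by omega) [] (cur.reverse :: acc)]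
      cases h : mySplit rest with
      | nil => exact absurd h (mySplit_ne_nil rest)
      | cons a t => simp [mySplit, h]
    · have hpfx : (['\n'] : List Char).isPrefixOf (c :: rest) = false := by
        simp only [List.isPrefixOf, Bool.and_eq_false_iff, beq_eq_false_iff_ne, ne_eq]
        exact Or.inl (fun hh => hc hh.symm)
      simp only [hpfx, Bool.false_eq_true, if_false]
      rw [ih f (by omega) (c :: cur) acc]
      cases h : mySplit rest with
      | nil => exact absurd h (mySplit_ne_nil rest)
      | cons a t => simp [mySplit, hc, h, List.modifyHead]

theorem splitOn_eq (cs : List Char) : PySem.Chars.splitOn cs ['\n'] = mySplit cs := by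
  rw [PySem.Chars.splitOn, splitOn_go_eq cs (cs.length + 1) (by omega)]
  cases h : mySplit cs with
  | nil => exact absurd h (mySplit_ne_nil cs)
  | cons a t => simp [h]

theorem join_mySplit (cs : List Char) : PySem.Chars.join ['\n'] (mySplit cs) = cs := by
  induction cs with
  | nil => simp [mySplit, PySem.Chars.join_singleton]
  | cons c rest ih =>
    cases h : mySplit rest with
    | nil => exact absurd h (mySplit_ne_nil rest)
    | cons a t =>
      by_cases hc : c = '\n'
      · subst hc
        simp only [mySplit, if_pos rfl, h, if_true]
        rw [PySem.Chars.join_cons_cons]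
        rw [h] at ih
        simp [ih]
      · simp only [mySplit, if_neg hc, h, List.modifyHead]
        rw [h] at ih
        cases t with
        | nil =>
          rw [PySem.Chars.join_singleton] at ih ⊢
          simp [ih]
        | cons b t' =>
          rw [PySem.Chars.join_cons_cons] at ih ⊢
          simp [← ih]

theorem mySplit_no_nl (cs : List Char) (h : '\n' ∉ cs) : mySplit cs = [cs] := by
  induction cs with
  | nil => simp [mySplit]
  | cons c rest ih =>
    simp only [List.mem_cons, not_or] at h
    simp only [mySplit, ih h.2, List.modifyHead]
    rw [if_neg (fun hh : c = '\n' => h.1 hh.symm)]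

theorem mySplit_append (l0 rest : List Char) (h : '\n' ∉ l0) :
    mySplit (l0 ++ '\n' :: rest) = l0 :: mySplit rest := by
  induction l0 with
  | nil => simp [mySplit]
  | cons c t ih =>
    simp only [List.mem_cons, not_or] at h
    simp only [List.cons_append, mySplit, ih h.2, List.modifyHead,
      if_neg (fun hh : c = '\n' => h.1 hh.symm)]

theorem first_nl_split (cs : List Char) (h : '\n' ∈ cs) :
    ∃ l0 rest, cs = l0 ++ '\n' :: rest ∧ '\n' ∉ l0 := by
  induction cs with
  | nil => simp at h
  | cons c t ih =>
    by_cases hc : c = '\n'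
    · exact ⟨[], t, by simp [hc], by simp⟩
    · have ht : '\n' ∈ t := by
        rcases List.mem_cons.mp h with h1 | h1
        · exact absurd h1.symm hc
        · exact h1
      obtain ⟨l0, rest, rfl, hl0⟩ := ih ht
      exact ⟨c :: l0, rest, by simp, by simp only [List.mem_cons, not_or]; exact ⟨fun hh => hc hh.symm, hl0⟩⟩

theorem find_go_shift (sub : List Char) (hs : sub ≠ []) (l : List Char) : ∀ (k : Nat),
    PySem.Chars.find.go sub l k
      = if PySem.Chars.find l sub = -1 then -1 else (k : Int) + PySem.Chars.find l sub := by
  induction l with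
  | nil =>
    intro k
    simp [PySem.Chars.find, PySem.Chars.find.go.eq_1, List.isEmpty_iff, hs]
  | cons c t ih =>
    intro k
    rw [PySem.Chars.find.go.eq_2]
    by_cases hp : sub.isPrefixOf (c :: t) = true
    · have h0 : PySem.Chars.find (c :: t) sub = 0 := by
        simp [PySem.Chars.find, PySem.Chars.find.go.eq_2, hp]
      simp [hp, h0]
    · have h0 : PySem.Chars.find (c :: t) sub = PySem.Chars.find.go sub t 1 := by
        simp [PySem.Chars.find, PySem.Chars.find.go.eq_2, hp]
      have hge := PySem.Chars.neg_one_le_find t sub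
      rw [if_neg hp, ih (k+1), h0, ih 1]
      rcases eq_or_lt_of_le hge with he | hl
      · simp [← he]
      · have hne : ¬ PySem.Chars.find t sub = -1 := by omega
        have hne2 : ¬ (1 : Int) + PySem.Chars.find t sub = -1 := by omega
        simp only [if_neg hne, if_neg hne2]
        omega

theorem find_cons (sub : List Char) (hs : sub ≠ []) (c : Char) (t : List Char) :
    PySem.Chars.find (c :: t) sub
      = if sub.isPrefixOf (c :: t) then 0
        else if PySem.Chars.find t sub = -1 then -1 else 1 + PySem.Chars.find t sub := by
  rw [PySem.Chars.find, PySem.Chars.find.go.eq_2]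
  by_cases hp : sub.isPrefixOf (c :: t) = true
  · simp [hp]
  · simp only [hp, if_false, Bool.false_eq_true]
    rw [find_go_shift sub hs t 1]
    simp

theorem prefix_append_cons (sub a b : List Char) (x : Char) (hx : x ∉ sub)
    (h : sub <+: a ++ x :: b) : sub <+: a := by
  have hlen : sub.length ≤ a.length := by
    by_contra hgt
    push_neg at hgt
    have hg := h.getElem (i := a.length) (by omega)
    have hx' : x ∈ sub := by
      have hv : sub[a.length]'(by omega) = x := by
        rw [hg]
        simp
      exact hv ▸ List.getElem_mem _
    exact hx hx'
  have heq : sub = (a ++ x :: b).take sub.length := List.prefix_iff_eq_take.mp h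
  rw [List.take_append_of_le_length hlen] at heq
  rw [heq]
  exact List.take_prefix _ _

theorem not_isPrefixOf_cons_nl (sub : List Char) (hs : sub ≠ []) (hnl : '\n' ∉ sub)
    (rest : List Char) : sub.isPrefixOf ('\n' :: rest) = false := by
  cases sub with
  | nil => exact absurd rfl hs
  | cons s0 s' =>
    have h0 : s0 ≠ '\n' := fun hh => hnl (by simp [hh])
    simp [List.isPrefixOf, h0]

theorem find_append_nl (sub : List Char) (hs : sub ≠ []) (hnl : '\n' ∉ sub)
    (l0 rest : List Char) (h0 : ¬ sub <:+: l0) :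
    PySem.Chars.find (l0 ++ '\n' :: rest) sub
      = if PySem.Chars.find rest sub = -1 then -1
        else ((l0.length : Int) + 1) + PySem.Chars.find rest sub := by
  induction l0 with
  | nil =>
    simp only [List.nil_append, List.length_nil]
    rw [find_cons sub hs]
    simp only [not_isPrefixOf_cons_nl sub hs hnl rest, Bool.false_eq_true, if_false]
    have hge := PySem.Chars.neg_one_le_find rest sub
    split <;> omega
  | cons c t ih =>
    have hnt : ¬ sub <:+: t := fun hh => h0 (List.infix_cons hh)
    have hp : sub.isPrefixOf (c :: (t ++ '\n' :: rest)) = false := by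
      by_contra hb
      rw [Bool.not_eq_false, List.isPrefixOf_iff_prefix] at hb
      have := prefix_append_cons sub (c :: t) rest '\n' hnl (by simpa using hb)
      exact h0 this.isInfix
    rw [List.cons_append, find_cons sub hs, hp, ih hnt]
    
    simp only [Bool.false_eq_true, if_false, List.length_cons]
    have hge := PySem.Chars.neg_one_le_find rest sub
    split
    · rfl
    · split <;> omega

theorem find_append_left (sub : List Char) (hs : sub ≠ []) (hnl : '\n' ∉ sub)
    (l0 rest : List Char) (h0 : sub <:+: l0) :
    PySem.Chars.find (l0 ++ '\n' :: rest) sub = PySem.Chars.find l0 sub := by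
  induction l0 with
  | nil =>
    exact absurd (List.eq_nil_of_infix_nil h0) hs
  | cons c t ih =>
    rw [List.cons_append, find_cons sub hs, find_cons sub hs c t]
    have hpp : sub.isPrefixOf (c :: (t ++ '\n' :: rest)) = sub.isPrefixOf (c :: t) := by
      by_cases hp : sub.isPrefixOf (c :: t) = true
      · have hp' : sub <+: c :: t := List.isPrefixOf_iff_prefix.mp hp
        have h2 : sub.isPrefixOf (c :: (t ++ '\n' :: rest)) = true := by
          rw [List.isPrefixOf_iff_prefix]
          simpa using List.prefix_append_of_prefix hp' (l₃ := '\n' :: rest)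
        rw [h2, hp]
      · rw [Bool.not_eq_true] at hp
        have h2 : sub.isPrefixOf (c :: (t ++ '\n' :: rest)) = false := by
          by_contra hb
          rw [Bool.not_eq_false, List.isPrefixOf_iff_prefix] at hb
          have h3 := prefix_append_cons sub (c :: t) rest '\n' hnl (by simpa using hb)
          rw [← List.isPrefixOf_iff_prefix] at h3
          rw [h3] at hp
          simp at hp
        rw [h2, hp]
    rw [hpp]
    by_cases hp : sub.isPrefixOf (c :: t) = true
    · simp [hp]
    · have hin : sub <:+: t := by
        rcases (List.infix_cons_iff.mp h0) with h1 | h1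
        · rw [← List.isPrefixOf_iff_prefix] at h1
          exact absurd h1 hp
        · exact h1
      rw [Bool.not_eq_true] at hp
      simp only [hp, Bool.false_eq_true, if_false, ih hin]

theorem find_no_nl (a : List Char) (h : '\n' ∉ a) : PySem.Chars.find a ['\n'] = -1 := by
  rw [PySem.Chars.find_eq_neg_one_iff]
  intro hinf
  exact h (hinf.mem (by simp))

theorem find_nl_boundary (a rest : List Char) (h : '\n' ∉ a) :
    PySem.Chars.find (a ++ '\n' :: rest) ['\n'] = (a.length : Int) := by
  induction a with
  | nil =>
    rw [List.nil_append, find_cons (['\n'] : List Char) (by simp)]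
    simp [List.isPrefixOf]
  | cons c t ih =>
    simp only [List.mem_cons, not_or] at h
    rw [List.cons_append, find_cons _ (by simp)]
    have hp : (['\n'] : List Char).isPrefixOf (c :: (t ++ '\n' :: rest)) = false := by
      simp only [List.isPrefixOf, Bool.and_eq_false_iff, beq_eq_false_iff_ne, ne_eq]
      exact Or.inl h.1
    rw [hp, ih h.2]
    simp only [Bool.false_eq_true, if_false, List.length_cons]
    split <;> push_cast <;> omega

theorem findIdx?_some_lt {α : Type} (p : α → Bool) (l : List α) : ∀ (i : Nat),
    l.findIdx? p = some i → i < l.length := by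
  induction l with
  | nil => intro i h; simp at h
  | cons a t ih =>
    intro i h
    rw [List.findIdx?_cons] at h
    by_cases hp : p a = true
    · simp [hp] at h
      simp [List.length_cons]
      omega
    · rw [Bool.not_eq_true] at hp
      simp only [hp, Bool.false_eq_true, if_false] at h
      cases ht : t.findIdx? p with
      | none => rw [ht] at h; simp at h
      | some j =>
        rw [ht] at h
        simp only [Option.map_some] at h
        have hji := Option.some.inj h
        have := ih j ht
        simp only [List.length_cons]
        omega

def lineEnd (cs : List Char) (p : Int) : Nat :=
  let e0 := PySem.Chars.findFrom cs ['\n'] p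
  if e0 = -1 then cs.length else e0.toNat

-- lineEnd at a found position p ≥ 0 with p.toNat ≤ cs.length, via find on the drop
theorem lineEnd_eq (cs : List Char) (p : Int) (hp : 0 ≤ p) (hle : p.toNat ≤ cs.length) :
    lineEnd cs p = if PySem.Chars.find (cs.drop p.toNat) ['\n'] = -1 then cs.length
      else p.toNat + (PySem.Chars.find (cs.drop p.toNat) ['\n']).toNat := by
  unfold lineEnd
  rw [show p = ((p.toNat : Nat) : Int) from (Int.toNat_of_nonneg hp).symm,
    PySem.Chars.findFrom_natCast cs ['\n'] p.toNat hle]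
  simp only [Int.toNat_natCast]
  have hge := PySem.Chars.neg_one_le_find (cs.drop p.toNat) ['\n']
  by_cases hf : PySem.Chars.find (cs.drop p.toNat) ['\n'] = -1
  · simp only [if_pos hf]
    simp
  · rw [if_neg hf, if_neg hf, if_neg (by omega)]
    omega

theorem core (sub : List Char) (hs : sub ≠ []) (hnl : '\n' ∉ sub) (new : List Char) :
    ∀ (cs : List Char),
    ((mySplit cs).findIdx? (fun l => PySem.Chars.isIn sub l) = none
        ↔ PySem.Chars.find cs sub = -1)
    ∧ (match (mySplit cs).findIdx? (fun l => PySem.Chars.isIn sub l) with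
       | none => cs
       | some i => PySem.Chars.join ['\n']
           ((mySplit cs).take (i+1) ++ new :: (mySplit cs).drop (i+1)))
      = (if PySem.Chars.find cs sub = -1 then cs
         else cs.take (lineEnd cs (PySem.Chars.find cs sub)) ++ '\n' :: new
              ++ cs.drop (lineEnd cs (PySem.Chars.find cs sub))) := by
  intro cs
  generalize hn : cs.length = n
  induction n using Nat.strong_induction_on generalizing cs with
  | _ n ih =>
  by_cases hmem : '\n' ∈ cs
  · obtain ⟨l0, rest, rfl, hl0⟩ := first_nl_split cs hmem
    have hlen : rest.length < n := by simp at hn; omega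
    have ihr := ih rest.length hlen rest rfl
    rw [mySplit_append l0 rest hl0]
    by_cases hin0 : PySem.Chars.isIn sub l0 = true
    · -- sub occurs in the first line l0
      have hinf0 := (PySem.Chars.isIn_iff_infix sub l0).mp hin0
      have hfl := find_append_left sub hs hnl l0 rest hinf0
      have hp0 : 0 ≤ PySem.Chars.find l0 sub := (PySem.Chars.find_nonneg_iff l0 sub).mpr hinf0
      have hple : (PySem.Chars.find l0 sub).toNat ≤ l0.length := by
        have := PySem.Chars.find_le_length l0 sub; omega
      constructor
      · rw [List.findIdx?_cons, if_pos hin0, hfl]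
        constructor
        · intro hh; simp at hh
        · intro hh; omega
      · rw [List.findIdx?_cons, if_pos hin0]
        have hE : lineEnd (l0 ++ '\n' :: rest) (PySem.Chars.find (l0 ++ '\n' :: rest) sub)
            = l0.length := by
          have hnd : '\n' ∉ l0.drop (PySem.Chars.find l0 sub).toNat :=
            fun hh => hl0 (List.drop_subset _ _ hh)
          rw [hfl, lineEnd_eq _ _ hp0 (by simp only [List.length_append, List.length_cons]; omega),
            List.drop_append_of_le_length hple, find_nl_boundary _ rest hnd]
          simp only [List.length_drop]
          rw [if_neg (by omega)]
          omega
        rw [hE, if_neg (by rw [hfl]; omega)]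
        -- LHS: join ['\n'] (l0 :: new :: mySplit rest)
        cases hT : mySplit rest with
        | nil => exact absurd hT (mySplit_ne_nil rest)
        | cons a t =>
          simp only [List.take_succ_cons, List.take_zero, List.drop_succ_cons, List.drop_zero,
            List.cons_append, List.nil_append]
          rw [PySem.Chars.join_cons_cons, PySem.Chars.join_cons_cons]
          have hjr : PySem.Chars.join ['\n'] (a :: t) = rest := by
            rw [← hT]; exact join_mySplit rest
          rw [hjr, List.take_left, List.drop_left]
          simp
    · -- first line is sub-free
      have hninf0 : ¬ sub <:+: l0 :=
        fun hh => by rw [(PySem.Chars.isIn_iff_infix sub l0).mpr hh] at hin0; exact hin0 rfl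
      have hfl := find_append_nl sub hs hnl l0 rest hninf0
      rw [List.findIdx?_cons, if_neg (by simp [hin0])]
      by_cases hrf : PySem.Chars.find rest sub = -1
      · have hTnone := ihr.1.mpr hrf
        rw [hTnone]
        constructor
        · rw [hfl, if_pos hrf]
          simp
        · rw [hfl, if_pos hrf]
          simp [if_pos hrf]
      · have hfr0 : 0 ≤ PySem.Chars.find rest sub := by
          have := PySem.Chars.neg_one_le_find rest sub; omega
        have hrle : (PySem.Chars.find rest sub).toNat ≤ rest.length := by
          have := PySem.Chars.find_le_length rest sub; omega
        obtain ⟨i, hi⟩ : ∃ i, (mySplit rest).findIdx? (fun l => PySem.Chars.isIn sub l) = some i := by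
          cases hh : (mySplit rest).findIdx? (fun l => PySem.Chars.isIn sub l) with
          | none => exact absurd (ihr.1.mp hh) hrf
          | some j => exact ⟨j, rfl⟩
        have hcs : PySem.Chars.find (l0 ++ '\n' :: rest) sub
            = ((l0.length : Int) + 1) + PySem.Chars.find rest sub := by
          rw [hfl, if_neg hrf]
        have hcne : ¬ PySem.Chars.find (l0 ++ '\n' :: rest) sub = -1 := by rw [hcs]; omega
        constructor
        · rw [hi]
          constructor
          · intro hh; simp at hh
          · intro hh; exact absurd hh hcne
        · rw [hi, Option.map_some, if_neg hcne]
          -- relate lineEnd on the whole to lineEnd on rest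
          have hsplit : l0 ++ '\n' :: rest = (l0 ++ ['\n']) ++ rest := by simp
          have hE : lineEnd (l0 ++ '\n' :: rest) (PySem.Chars.find (l0 ++ '\n' :: rest) sub)
              = l0.length + 1 + lineEnd rest (PySem.Chars.find rest sub) := by
            rw [hcs, lineEnd_eq _ _ (by omega) (by simp only [List.length_append, List.length_cons]; omega),
              lineEnd_eq _ _ hfr0 hrle]
            have hdrop : (l0 ++ '\n' :: rest).drop ((((l0.length : Int) + 1)
                + PySem.Chars.find rest sub).toNat)
                = rest.drop (PySem.Chars.find rest sub).toNat := by
              rw [hsplit, List.drop_append]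
              have h1 : (((l0.length : Int) + 1) + PySem.Chars.find rest sub).toNat
                  = (l0 ++ ['\n']).length + (PySem.Chars.find rest sub).toNat := by
                simp only [List.length_append, List.length_cons, List.length_nil]
                omega
              rw [h1]
              simp
            rw [hdrop]
            split
            · simp only [List.length_append, List.length_cons]
              omega
            · omega
          rw [hE]
          -- both sides decompose across l0 ++ '\n'
          have hmain := ihr.2
          rw [hi, if_neg hrf] at hmain
          cases hT : mySplit rest with
          | nil => exact absurd hT (mySplit_ne_nil rest)
          | cons a t =>
            rw [hT] at hmain
            simp only [List.take_succ_cons, List.drop_succ_cons, List.cons_append] at hmain ⊢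
            rw [PySem.Chars.join_cons_cons, hmain]
            -- take/drop across l0 ++ '\n' :: rest
            set E := lineEnd rest (PySem.Chars.find rest sub) with hEdef
            have htk : List.take (l0.length + 1 + E) (l0 ++ '\n' :: rest)
                = l0 ++ '\n' :: List.take E rest := by
              rw [hsplit, List.take_append]
              have h1 : List.take (l0.length + 1 + E) (l0 ++ ['\n']) = l0 ++ ['\n'] := by
                apply List.take_of_length_le
                simp only [List.length_append, List.length_cons, List.length_nil]
                omega
              rw [h1]
              simp only [List.length_append, List.length_cons, List.length_nil]
              have h2 : l0.length + 1 + E - (l0.length + 1) = E := by omega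
              rw [show l0.length + 1 + E - (l0.length + (0+1)) = E by omega]
              simp
            have hdr : List.drop (l0.length + 1 + E) (l0 ++ '\n' :: rest)
                = List.drop E rest := by
              rw [hsplit, List.drop_append]
              have h1 : List.drop (l0.length + 1 + E) (l0 ++ ['\n']) = [] := by
                apply List.drop_eq_nil_of_le
                simp only [List.length_append, List.length_cons, List.length_nil]
                omega
              rw [h1]
              simp only [List.length_append, List.length_cons, List.length_nil]
              rw [show l0.length + 1 + E - (l0.length + (0+1)) = E by omega]
              simp
            rw [htk, hdr]
            simp
  · -- no newline at all: a single line
    rw [mySplit_no_nl cs hmem]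
    by_cases hin : PySem.Chars.isIn sub cs = true
    · have hinf := (PySem.Chars.isIn_iff_infix sub cs).mp hin
      have hp0 : 0 ≤ PySem.Chars.find cs sub := (PySem.Chars.find_nonneg_iff cs sub).mpr hinf
      have hple : (PySem.Chars.find cs sub).toNat ≤ cs.length := by
        have := PySem.Chars.find_le_length cs sub; omega
      constructor
      · rw [List.findIdx?_cons, if_pos hin]
        constructor
        · intro hh; simp at hh
        · intro hh; omega
      · rw [List.findIdx?_cons, if_pos hin, if_neg (by omega)]
        have hE : lineEnd cs (PySem.Chars.find cs sub) = cs.length := by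
          rw [lineEnd_eq _ _ hp0 hple]
          have hnd : '\n' ∉ cs.drop (PySem.Chars.find cs sub).toNat :=
            fun hh => hmem (List.drop_subset _ _ hh)
          rw [if_pos (find_no_nl _ hnd)]
        rw [hE]
        simp only [List.take_succ_cons, List.take_zero, List.drop_succ_cons, List.drop_zero,
          List.take_length, List.drop_length, List.nil_append, List.singleton_append]
        rw [PySem.Chars.join_cons_cons, PySem.Chars.join_singleton]
        simp
    · have hfind : PySem.Chars.find cs sub = -1 := by
        rw [PySem.Chars.find_eq_neg_one_iff]
        intro hh
        rw [(PySem.Chars.isIn_iff_infix sub cs).mpr hh] at hin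
        exact hin rfl
      constructor
      · rw [List.findIdx?_cons, if_neg (by simp [hin]), hfind]
        simp
      · rw [List.findIdx?_cons, if_neg (by simp [hin]), if_pos hfind]
        simp


theorem hnsLoop_eq (season : Int) (lines : List String) (data : String) :
    ∀ (ls : List String) (k : Int),
    hnsLoop season lines data (PySem.List.enumerate ls k)
      = match ls.findIdx? (fun l => PySem.Str.isIn "<showtitle>" l) with
        | none => data
        | some j => PySem.Str.join "\n" (PySem.List.insert lines (k + (j : Int) + 1)
            ("  <season>" ++ PySem.Int.toStr season ++ "</season>")) := by
  intro ls
  induction ls with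
  | nil =>
    intro k
    rw [PySem.List.enumerate_nil]
    simp [hnsLoop]
  | cons x xs ihx =>
    intro k
    rw [PySem.List.enumerate_cons, List.findIdx?_cons]
    by_cases hx : PySem.Str.isIn "<showtitle>" x = true
    · simp only [hnsLoop, hx, if_pos rfl, if_true]
      norm_num
    · rw [Bool.not_eq_true] at hx
      simp only [hnsLoop, hx, Bool.false_eq_true, if_false, ihx (k + 1)]
      cases hf : xs.findIdx? (fun l => PySem.Str.isIn "<showtitle>" l) with
      | none => simp
      | some j =>
        simp only [Option.map_some]
        rw [show k + 1 + (j : Int) + 1 = k + ((j : Nat) + 1 : Nat) + 1 by push_cast; ring]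

-- ===== VERDICT (by name: the statement is the Claim_ definition above) =====
theorem handle_no_season_spec : Claim_equal_handle_no_season := by
  unfold Claim_equal_handle_no_season
  intro data season _
  unfold Spec_handle_no_season handle_no_season handle_no_season_alt
  by_cases hg : (PySem.Str.isIn "<episodedetails>" data && !PySem.Str.isIn "<season>" data
      && !PySem.Str.isIn "</season>" data) = true
  swap
  · rw [Bool.not_eq_true] at hg
    simp only [hg, Bool.false_eq_true, if_false]
  · simp only [hg, if_true]
    have hnlL : ("\n" : String).toList = ['\n'] := by decide
    have hstL : ("<showtitle>" : String).toList
        = ['<','s','h','o','w','t','i','t','l','e','>'] := by decide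
    set subL : List Char := ['<','s','h','o','w','t','i','t','l','e','>'] with hsubL
    have hsne : subL ≠ [] := by decide
    have hsnl : '\n' ∉ subL := by decide
    set cs := data.toList with hcs
    have hlines : (PySem.Str.split? data "\n").getD []
        = (mySplit cs).map String.ofList := by
      rw [PySem.Str.split?, hnlL]
      rw [show PySem.Chars.split? cs ['\n'] = some (PySem.Chars.splitOn cs ['\n']) from rfl]
      rw [splitOn_eq]
      rfl
    rw [hlines, hnsLoop_eq, List.findIdx?_map]
    have hpred : ((fun l => PySem.Str.isIn "<showtitle>" l) ∘ String.ofList)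
        = (fun l => PySem.Chars.isIn subL l) := by
      funext l
      simp [PySem.Str.isIn, hstL]
    rw [hpred]
    have hfind : PySem.Str.find data "<showtitle>" = PySem.Chars.find cs subL := by
      rw [PySem.Str.find, hstL]
    have hcore := core subL hsne hsnl
      ("  <season>" ++ PySem.Int.toStr season ++ "</season>").toList cs
    cases h : (mySplit cs).findIdx? (fun l => PySem.Chars.isIn subL l) with
    | none =>
      have hneg : PySem.Chars.find cs subL = -1 := (hcore.1).mp h
      rw [hfind, hneg]
      simp
    | some i =>
      simp only []
      have hne : ¬ PySem.Chars.find cs subL = -1 := by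
        intro hh
        rw [(hcore.1).mpr hh] at h
        simp at h
      rw [hfind]
      rw [if_pos (by exact hne)]
      -- both sides are strings; compare their char lists
      apply String.toList_inj.mp
      have hilt : i < (mySplit cs).length := by
        have := findIdx?_some_lt (fun l => PySem.Chars.isIn subL l) (mySplit cs) i h
        exact this
      -- LHS
      have hcast : (0 : Int) + (i : Int) + 1 = ((i + 1 : Nat) : Int) := by push_cast; ring
      rw [hcast, PySem.List.insert_natCast _ (i+1) _
        (by simp only [List.length_map]; omega)]
      rw [PySem.Str.toList_join, hnlL]
      have hmaps : List.map String.toList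
          (List.take (i+1) (List.map String.ofList (mySplit cs))
            ++ ("  <season>" ++ PySem.Int.toStr season ++ "</season>")
              :: List.drop (i+1) (List.map String.ofList (mySplit cs)))
          = List.take (i+1) (mySplit cs)
            ++ ("  <season>" ++ PySem.Int.toStr season ++ "</season>").toList
              :: List.drop (i+1) (mySplit cs) := by
        simp [List.map_append, ← List.map_take, ← List.map_drop, List.map_map,
          Function.comp_def]
      rw [hmaps]
      -- now use the core equality
      have hmain := hcore.2
      rw [h, if_neg hne] at hmain
      simp only [] at hmain
      rw [hmain]
      -- RHS: B's slices
      have hp0 : 0 ≤ PySem.Chars.find cs subL := by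
        have := PySem.Chars.neg_one_le_find cs subL; omega
      have hple : (PySem.Chars.find cs subL).toNat ≤ cs.length := by
        have := PySem.Chars.find_le_length cs subL; omega
      have hff : PySem.Str.findFrom data "\n" (PySem.Chars.find cs subL)
          = PySem.Chars.findFrom cs ['\n'] (PySem.Chars.find cs subL) := by
        rw [PySem.Str.findFrom, hnlL]
      rw [hff]
      set e0 := PySem.Chars.findFrom cs ['\n'] (PySem.Chars.find cs subL) with he0
      have hee : (if e0 = -1 then PySem.Str.len data else e0)
          = ((lineEnd cs (PySem.Chars.find cs subL) : Nat) : Int) := by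
        rw [lineEnd_eq _ _ hp0 hple, he0]
        rw [show (PySem.Chars.find cs subL)
            = (((PySem.Chars.find cs subL).toNat : Nat) : Int) from
          (Int.toNat_of_nonneg hp0).symm,
          PySem.Chars.findFrom_natCast cs ['\n'] (PySem.Chars.find cs subL).toNat hple]
        simp only [Int.toNat_natCast]
        have hge := PySem.Chars.neg_one_le_find
          (cs.drop (PySem.Chars.find cs subL).toNat) ['\n']
        by_cases hfd : PySem.Chars.find (cs.drop (PySem.Chars.find cs subL).toNat) ['\n'] = -1
        · simp only [if_pos hfd, if_true]
          rw [PySem.Str.len, ← hcs]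
        · rw [if_neg hfd, if_neg (by omega), if_neg hfd]
          push_cast
          omega
      rw [hee]
      set E := lineEnd cs (PySem.Chars.find cs subL) with hE
      have hsl1 : (PySem.Str.slice data none (some ((E : Nat) : Int))).toList
          = cs.take E := by
        rw [PySem.Str.toList_slice, PySem.Chars.slice_eq_listSlice,
          PySem.List.slice_to_natCast]
      have hsl2 : (PySem.Str.slice data (some ((E : Nat) : Int)) none).toList
          = cs.drop E := by
        rw [PySem.Str.toList_slice, PySem.Chars.slice_eq_listSlice,
          PySem.List.slice_from_natCast]
      simp only [String.toList_append, hsl1, hsl2]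
      have hlit : ("\n  <season>" : String).toList
          = '\n' :: ("  <season>" : String).toList := by decide
      simp only [hlit, String.toList_append]
      simp
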